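-- pv_equiv track=rewrite | github.com/lkubicki/python | nasluch2.py | nasluch2
-- ===== SOURCE A (Python) =====
-- def nasluch2(napis1, napis2):
--     suma = 0
--     tekst1, tekst2 = list(napis1), list(napis2)
--     for i in range(min(len(tekst1), len(tekst2))):
--         if tekst1[i] == tekst2[i]:
--             suma = suma + 10
--             tekst1[i] = '_'
--             tekst2[i] = '_'
--
--     for i in range(len(tekst1)):
--         if tekst1[i] != '_':
--             for j in range(len(tekst2)):
--                 if tekst1[i] == tekst2[j] and tekst2[j] != '_':
--                     suma += 1
--                     tekst1[i] = '_'
--                     tekst2[j] = '_'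
--
--     return suma
-- ===== SOURCE B (Python) =====
-- def nasluch2(napis1, napis2):
--     exact = sum(a == b for a, b in zip(napis1, napis2))
--     common = sum(min(napis1.count(c), napis2.count(c)) for c in set(napis1))
--     return 9 * exact + common
-- ===== Notes on version B (the rewrite author's own statement) =====
-- stated objective: faster
-- what changed: Replaced the mutate-and-rescan nested loops (mark matched characters with '_' and rescan the second string for each leftover) by the closed-form Mastermind score 9*exact + sum over distinct characters of min(count,count).
-- intended difference: On inputs where both strings contain a '_' that is not part of a position where both strings have '_', A returns a score that omits those colour matches (its code uses '_' as an in-band consumed-marker, so real underscores can never score a colour point), while B counts '_' like any other character, which is the intended scoring. — e.g. on nasluch2("_a", "b_"): A returns 0, B returns 1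
import Mathlib
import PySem

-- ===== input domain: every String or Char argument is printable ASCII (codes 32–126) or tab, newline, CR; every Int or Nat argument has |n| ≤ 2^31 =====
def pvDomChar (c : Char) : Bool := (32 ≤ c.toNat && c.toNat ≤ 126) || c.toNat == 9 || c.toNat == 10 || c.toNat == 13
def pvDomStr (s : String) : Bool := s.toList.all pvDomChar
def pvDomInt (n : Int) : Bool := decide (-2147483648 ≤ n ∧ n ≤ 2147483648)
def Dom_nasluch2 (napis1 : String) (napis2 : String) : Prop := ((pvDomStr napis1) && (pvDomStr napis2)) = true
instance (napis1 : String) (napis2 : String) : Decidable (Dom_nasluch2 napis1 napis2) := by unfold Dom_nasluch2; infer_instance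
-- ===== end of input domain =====

-- B replaces A's mark-with-'_'-and-rescan nested loops by the closed-form
-- Mastermind score 9*exact + sum of min(count,count) over distinct characters
-- (objective: faster, measured); B intentionally differs from A on the D_ inputs below,
-- where A's in-band '_' marker suppresses colour matches of real underscores.

-- ===== PORT A =====
-- body of A's first for-loop
def pvStep1 (st : Int × List Char × List Char) (i : Int) : Int × List Char × List Char :=
  if PySem.List.pyGetD st.2.1 i ' ' = PySem.List.pyGetD st.2.2 i ' ' then
    (st.1 + 10, PySem.List.pySetD st.2.1 i '_', PySem.List.pySetD st.2.2 i '_')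
  else st

-- body of A's inner for-loop (over j, at fixed i)
def pvInner (i : Int) (st : Int × List Char × List Char) (j : Int) : Int × List Char × List Char :=
  if PySem.List.pyGetD st.2.1 i ' ' = PySem.List.pyGetD st.2.2 j ' ' ∧
     PySem.List.pyGetD st.2.2 j ' ' ≠ '_' then
    (st.1 + 1, PySem.List.pySetD st.2.1 i '_', PySem.List.pySetD st.2.2 j '_')
  else st

-- body of A's second for-loop (over i)
def pvStep2 (st : Int × List Char × List Char) (i : Int) : Int × List Char × List Char :=
  if PySem.List.pyGetD st.2.1 i ' ' ≠ '_' then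
    (PySem.List.pyRange 0 (st.2.2.length : Int) 1).foldl (pvInner i) st
  else st

def nasluch2 (napis1 : String) (napis2 : String) : Int :=
  let tekst1 := napis1.toList
  let tekst2 := napis2.toList
  let st1 := (PySem.List.pyRange 0 (min (tekst1.length : Int) (tekst2.length : Int)) 1).foldl
               pvStep1 (0, tekst1, tekst2)
  let st2 := (PySem.List.pyRange 0 (st1.2.1.length : Int) 1).foldl pvStep2 st1
  st2.1

-- ===== PORT B =====
def nasluch2_alt (napis1 : String) (napis2 : String) : Int :=
  let l1 := napis1.toList
  let l2 := napis2.toList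
  let exact : Int := ((l1.zip l2).map (fun p => if p.1 = p.2 then (1 : Int) else 0)).sum
  let common : Int :=
    ((PySem.Set.ofList l1).map
      (fun c => min ((l1.count c : Int)) ((l2.count c : Int)))).sum
  9 * exact + common

-- ===== PRECONDITION & SPEC =====
-- On inputs where both strings contain a '_' that is not part of a position
-- where both have '_' (i.e. fewer such positions than each string's '_' count),
-- A omits those colour matches ('_' is its in-band consumed-marker, so real
-- underscores never score a colour point); B counts '_' like any other
-- character, which is the intended scoring.
def D_nasluch2 (napis1 : String) (napis2 : String) : Prop :=
  (napis1.toList.zip napis2.toList).countP (fun p => p.1 == '_' && p.2 == '_')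
    < min (napis1.toList.count '_') (napis2.toList.count '_')
instance (napis1 : String) (napis2 : String) : Decidable (D_nasluch2 napis1 napis2) := by
  unfold D_nasluch2; infer_instance

def Spec_nasluch2 (napis1 : String) (napis2 : String) (out : Int) : Prop :=
  ¬ D_nasluch2 napis1 napis2 → out = nasluch2_alt napis1 napis2
instance (napis1 : String) (napis2 : String) (out : Int) : Decidable (Spec_nasluch2 napis1 napis2 out) := by
  unfold Spec_nasluch2; infer_instance

def pvDiffWitness_nasluch2 : String × String := ("_a", "b_")
def pvDiffWitnessOut_nasluch2 : Int × Int := (0, 1)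

-- ===== CLAIM (what is proved, stated in full; the proofs are below) =====
def Claim_unchanged_nasluch2 : Prop := ∀ (napis1 : String) (napis2 : String), Dom_nasluch2 napis1 napis2 → Spec_nasluch2 napis1 napis2 (nasluch2 napis1 napis2)
def Claim_changed_nasluch2 : Prop := Dom_nasluch2 (pvDiffWitness_nasluch2.1) (pvDiffWitness_nasluch2.2) ∧ D_nasluch2 (pvDiffWitness_nasluch2.1) (pvDiffWitness_nasluch2.2) ∧ nasluch2 (pvDiffWitness_nasluch2.1) (pvDiffWitness_nasluch2.2) = pvDiffWitnessOut_nasluch2.1 ∧ nasluch2_alt (pvDiffWitness_nasluch2.1) (pvDiffWitness_nasluch2.2) = pvDiffWitnessOut_nasluch2.2 ∧ pvDiffWitnessOut_nasluch2.1 ≠ pvDiffWitnessOut_nasluch2.2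
def Claim_exact_nasluch2 : Prop := ∀ (napis1 : String) (napis2 : String), Dom_nasluch2 napis1 napis2 → D_nasluch2 napis1 napis2 → nasluch2 napis1 napis2 ≠ nasluch2_alt napis1 napis2

-- ===== LEMMAS AND PROOFS =====

-- Abstract models used only by the proofs.

-- the characters of each string that are not part of a positional match
def pvLeft1 (l1 l2 : List Char) : List Char :=
  ((l1.zip l2).filter (fun p => !(p.1 == p.2))).map Prod.fst
    ++ l1.drop (min l1.length l2.length)
def pvLeft2 (l1 l2 : List Char) : List Char :=
  ((l1.zip l2).filter (fun p => !(p.1 == p.2))).map Prod.snd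
    ++ l2.drop (min l1.length l2.length)

-- leftover '_' count + doubly-'_' positions = the string's '_' count
theorem pv_cnt1 : ∀ (l1 l2 : List Char),
    (pvLeft1 l1 l2).count '_'
      + (l1.zip l2).countP (fun p => p.1 == '_' && p.2 == '_') = l1.count '_' := by
  intro l1
  induction l1 with
  | nil => intro l2; simp [pvLeft1]
  | cons a as ih =>
    intro l2
    cases l2 with
    | nil => simp [pvLeft1]
    | cons b bs =>
      have h := ih bs
      simp only [pvLeft1, List.count_append] at h ⊢
      by_cases hab : a = b <;> by_cases ha : a = '_' <;> by_cases hb : b = '_' <;>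
        simp only [List.zip_cons_cons, List.filter_cons, List.countP_cons, List.count_cons,
          Nat.succ_min_succ, List.drop_succ_cons, List.length_cons, hab, ha, hb, beq_iff_eq,
          if_true, if_false, Bool.not_true] <;>
        simp_all <;> omega

theorem pv_cnt2 : ∀ (l1 l2 : List Char),
    (pvLeft2 l1 l2).count '_'
      + (l1.zip l2).countP (fun p => p.1 == '_' && p.2 == '_') = l2.count '_' := by
  intro l1
  induction l1 with
  | nil => intro l2; simp [pvLeft2]
  | cons a as ih =>
    intro l2
    cases l2 with
    | nil => simp [pvLeft2]
    | cons b bs =>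
      have h := ih bs
      simp only [pvLeft2, List.count_append] at h ⊢
      by_cases hab : a = b <;> by_cases ha : a = '_' <;> by_cases hb : b = '_' <;>
        simp only [List.zip_cons_cons, List.filter_cons, List.countP_cons, List.count_cons,
          Nat.succ_min_succ, List.drop_succ_cons, List.length_cons, hab, ha, hb, beq_iff_eq,
          if_true, if_false, Bool.not_true] <;>
        simp_all <;> omega

-- simultaneous masking pass (A's first loop): exact-match count and both masked lists
def pvMark : List Char → List Char → Nat × List Char × List Char
  | [], l2 => (0, [], l2)
  | l1, [] => (0, l1, [])
  | a :: as, b :: bs =>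
      let r := pvMark as bs
      if a = b then (r.1 + 1, '_' :: r.2.1, '_' :: r.2.2) else (r.1, a :: r.2.1, b :: r.2.2)

-- replace the first occurrence of c by '_'
def pvMarkFirst (c : Char) : List Char → List Char
  | [] => []
  | y :: ys => if y = c then '_' :: ys else y :: pvMarkFirst c ys

-- greedy matching count (A's second loop, abstracted to erasure)
def pvG : List Char → List Char → Nat
  | [], _ => 0
  | c :: cs, l2 => if c ∈ l2 then pvG cs (l2.erase c) + 1 else pvG cs l2

-- fold simulation: a state abstraction commuting with the step commutes with the fold
theorem pv_foldl_hom {α σ τ : Type} (A : τ → σ) (f : σ → α → σ) (g : τ → α → τ)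
    (r : List α) (st : τ) (h : ∀ st a, f (A st) a = A (g st a)) :
    r.foldl f (A st) = A (r.foldl g st) := by
  induction r generalizing st with
  | nil => rfl
  | cons x xs ih => simp only [List.foldl_cons, h, ih]

-- pyRange 0 n 1 fold as a List.range fold
theorem pv_pyRange_fold_nat {σ : Type} (F : σ → Int → σ) (m : Nat) (st : σ) :
    (PySem.List.pyRange 0 (m : Int) 1).foldl F st
      = (List.range m).foldl (fun s (k : Nat) => F s (k : Int)) st := by
  induction m generalizing st with
  | zero => simp [PySem.List.pyRange_one_eq_nil]
  | succ n ih =>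
    rw [List.range_succ, List.foldl_append]
    rw [show ((n + 1 : Nat) : Int) = (n : Int) + 1 by push_cast; ring]
    rw [PySem.List.pyRange_one_succ_right (by positivity), List.foldl_append]
    rw [ih]
    rfl

theorem pv_range_succ_fold {σ : Type} (F : σ → Nat → σ) (m : Nat) (st : σ) :
    (List.range (m + 1)).foldl F st
      = (List.range m).foldl (fun s k => F s (k + 1)) (F st 0) := by
  rw [List.range_succ_eq_map, List.foldl_cons, List.foldl_map]

-- xs[0] = v on a cons list, with a literal Int index
theorem pv_pySetD_zero_cons (x : Char) (l : List Char) (v : Char) :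
    PySem.List.pySetD (x :: l) 0 v = v :: l := by
  rw [show (0 : Int) = ((0 : Nat) : Int) from rfl, PySem.List.pySetD_natCast]
  rfl

-- step of loop 1 at index k+1 on cons-lists is the step at k on the tails
theorem pv_step1_shift (x y : Char) (q : Int × List Char × List Char) (k : Nat) :
    pvStep1 (q.1, x :: q.2.1, y :: q.2.2) (((k + 1 : Nat) : Int))
      = ((pvStep1 q (k : Int)).1, x :: (pvStep1 q (k : Int)).2.1,
         y :: (pvStep1 q (k : Int)).2.2) := by
  simp only [pvStep1, PySem.List.pyGetD_natCast, PySem.List.pySetD_natCast,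
    List.getD_cons_succ, List.set_cons_succ]
  split_ifs <;> rfl

-- inner step at fixed row index 0 and column k+1 on a cons second list
theorem pv_inner_shift2 (y : Char) (q : Int × List Char × List Char) (k : Nat) :
    pvInner 0 (q.1, q.2.1, y :: q.2.2) (((k + 1 : Nat) : Int))
      = ((pvInner 0 q (k : Int)).1, (pvInner 0 q (k : Int)).2.1,
         y :: (pvInner 0 q (k : Int)).2.2) := by
  simp only [pvInner, PySem.List.pyGetD_natCast, PySem.List.pySetD_natCast,
    List.getD_cons_succ, List.set_cons_succ, PySem.List.pyGetD_zero]
  split_ifs <;> rfl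

-- inner step at row index k+1 on a cons first list (any column j)
theorem pv_inner_shift1 (x : Char) (q : Int × List Char × List Char) (k : Nat) (j : Int) :
    pvInner (((k + 1 : Nat) : Int)) (q.1, x :: q.2.1, q.2.2) j
      = ((pvInner (k : Int) q j).1, x :: (pvInner (k : Int) q j).2.1,
         (pvInner (k : Int) q j).2.2) := by
  simp only [pvInner, PySem.List.pyGetD_natCast, PySem.List.pySetD_natCast,
    List.getD_cons_succ, List.set_cons_succ]
  split_ifs <;> rfl

-- step of loop 2 at index k+1 on a cons first list is the step at k on the tail
theorem pv_step2_shift (x : Char) (q : Int × List Char × List Char) (k : Nat) :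
    pvStep2 (q.1, x :: q.2.1, q.2.2) (((k + 1 : Nat) : Int))
      = ((pvStep2 q (k : Int)).1, x :: (pvStep2 q (k : Int)).2.1,
         (pvStep2 q (k : Int)).2.2) := by
  simp only [pvStep2, PySem.List.pyGetD_natCast, List.getD_cons_succ]
  split_ifs with h
  · exact pv_foldl_hom (fun q => (q.1, x :: q.2.1, q.2.2)) _ (pvInner (k : Int)) _ q
      (fun st j => pv_inner_shift1 x st k j)
  · rfl

-- loop 1 computes pvMark
theorem pv_loop1_eq : ∀ (t1 t2 : List Char) (s : Int),
    (List.range (min t1.length t2.length)).foldl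
        (fun st (k : Nat) => pvStep1 st (k : Int)) (s, t1, t2)
      = (s + 10 * ((pvMark t1 t2).1 : Int), (pvMark t1 t2).2.1, (pvMark t1 t2).2.2) := by
  intro t1
  induction t1 with
  | nil => intro t2 s; simp [pvMark]
  | cons a as ih =>
    intro t2 s
    cases t2 with
    | nil => simp [pvMark]
    | cons b bs =>
      rw [show min (a :: as).length (b :: bs).length = min as.length bs.length + 1 by
        simp [Nat.succ_min_succ]]
      rw [pv_range_succ_fold]
      have hstep0 : pvStep1 (s, a :: as, b :: bs) ((0 : Nat) : Int)
          = if a = b then (s + 10, '_' :: as, '_' :: bs) else (s, a :: as, b :: bs) := by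
        simp only [pvStep1, PySem.List.pyGetD_natCast, PySem.List.pySetD_natCast,
          List.getD_cons_zero, List.set_cons_zero]
      rw [hstep0, pvMark]
      by_cases hab : a = b
      · rw [if_pos hab, if_pos hab]
        have hfold := pv_foldl_hom
          (fun q : Int × List Char × List Char => (q.1, '_' :: q.2.1, '_' :: q.2.2))
          (fun st (k : Nat) => pvStep1 st (((k + 1 : Nat)) : Int))
          (fun st (k : Nat) => pvStep1 st ((k : Nat) : Int))
          (List.range (min as.length bs.length)) (s + 10, as, bs)
          (fun st k => pv_step1_shift '_' '_' st k)
        simp only at hfold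
        rw [hfold, ih]
        simp only [Prod.mk.injEq]
        exact ⟨by push_cast; ring, trivial⟩
      · rw [if_neg hab, if_neg hab]
        have hfold := pv_foldl_hom
          (fun q : Int × List Char × List Char => (q.1, a :: q.2.1, b :: q.2.2))
          (fun st (k : Nat) => pvStep1 st (((k + 1 : Nat)) : Int))
          (fun st (k : Nat) => pvStep1 st ((k : Nat) : Int))
          (List.range (min as.length bs.length)) (s, as, bs)
          (fun st k => pv_step1_shift a b st k)
        simp only at hfold
        rw [hfold, ih]

-- inner loop is a no-op once the head of the first list is '_'
theorem pv_inner_dead : ∀ (r : List Int) (st : Int × List Char × List Char),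
    PySem.List.pyGetD st.2.1 0 ' ' = '_' → r.foldl (pvInner 0) st = st := by
  intro r
  induction r with
  | nil => intro st h; rfl
  | cons j js ih =>
    intro st h
    have hstep : pvInner 0 st j = st := by
      rw [pvInner, if_neg]
      rintro ⟨h1, h2⟩
      exact h2 (h1.symm.trans h)
    rw [List.foldl_cons, hstep, ih st h]

theorem pv_markFirst_filter (a : Char) (t2 : List Char) (ha : a ≠ '_') :
    (pvMarkFirst a t2).filter (fun c => c ≠ '_') = (t2.filter (fun c => c ≠ '_')).erase a := by
  induction t2 with
  | nil => simp [pvMarkFirst]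
  | cons y ys ih =>
    rw [pvMarkFirst]
    by_cases hy : y = a
    · subst hy
      simp [ha, List.erase_cons_head]
    · rw [if_neg hy]
      by_cases hu : y = '_'
      · subst hu
        simpa [List.filter_cons] using ih
      · rw [List.filter_cons, List.filter_cons]
        simp only [ne_eq, hu, decide_not, decide_false, Bool.not_false, if_pos]
        rw [List.erase_cons_tail (by simp [hy])]
        simp only [ne_eq, decide_not] at ih
        rw [ih]

-- inner loop at i = 0: mark the first usable occurrence of the head character
theorem pv_inner0 : ∀ (t2 : List Char) (s : Int) (a : Char) (t1 : List Char), a ≠ '_' →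
    (List.range t2.length).foldl (fun st (k : Nat) => pvInner 0 st (k : Int)) (s, a :: t1, t2)
      = if a ∈ t2 then (s + 1, '_' :: t1, pvMarkFirst a t2) else (s, a :: t1, t2) := by
  intro t2
  induction t2 with
  | nil => intro s a t1 ha; simp
  | cons y ys ih =>
    intro s a t1 ha
    rw [show (y :: ys).length = ys.length + 1 from rfl, pv_range_succ_fold]
    have hstep0 : pvInner 0 (s, a :: t1, y :: ys) ((0 : Nat) : Int)
        = if a = y then (s + 1, '_' :: t1, '_' :: ys) else (s, a :: t1, y :: ys) := by
      simp only [pvInner, PySem.List.pyGetD_natCast, PySem.List.pySetD_natCast,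
        List.getD_cons_zero, List.set_cons_zero, PySem.List.pyGetD_zero_cons,
        pv_pySetD_zero_cons]
      by_cases h : a = y
      · rw [if_pos ⟨h, h ▸ ha⟩, if_pos h]
      · rw [if_neg (fun hc => h hc.1), if_neg h]
    rw [hstep0]
    by_cases h : a = y
    · rw [if_pos h]
      have hdead : (List.range ys.length).foldl
            (fun st (k : Nat) => pvInner 0 st ((k + 1 : Nat) : Int)) (s + 1, '_' :: t1, '_' :: ys)
          = (s + 1, '_' :: t1, '_' :: ys) := by
        rw [← List.foldl_map]
        exact pv_inner_dead _ _ (by simp)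
      rw [hdead, if_pos (by simp [h]), pvMarkFirst, if_pos h.symm]
    · rw [if_neg h]
      have hfold := pv_foldl_hom
        (fun q : Int × List Char × List Char => (q.1, q.2.1, y :: q.2.2))
        (fun st (k : Nat) => pvInner 0 st (((k + 1 : Nat)) : Int))
        (fun st (k : Nat) => pvInner 0 st ((k : Nat) : Int))
        (List.range ys.length) (s, a :: t1, ys)
        (fun st k => pv_inner_shift2 y st k)
      simp only at hfold
      rw [hfold, ih s a t1 ha]
      by_cases hm : a ∈ ys
      · rw [if_pos hm, if_pos (List.mem_cons_of_mem y hm), pvMarkFirst,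
          if_neg (fun hy => h hy.symm)]
      · rw [if_neg hm, if_neg (by simp [List.mem_cons, h, hm])]

-- loop 2 computes the greedy matching count on the non-'_' characters
theorem pv_loop2_eq : ∀ (t1 t2 : List Char) (s : Int),
    ((List.range t1.length).foldl (fun st (k : Nat) => pvStep2 st (k : Int)) (s, t1, t2)).1
      = s + (pvG (t1.filter (fun c => c ≠ '_')) (t2.filter (fun c => c ≠ '_')) : Int) := by
  intro t1
  induction t1 with
  | nil => intro t2 s; simp [pvG]
  | cons a t1 ih =>
    intro t2 s
    rw [show (a :: t1).length = t1.length + 1 from rfl, pv_range_succ_fold]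
    by_cases ha : a = '_'
    · have hstep0 : pvStep2 (s, a :: t1, t2) ((0 : Nat) : Int) = (s, a :: t1, t2) := by
        rw [pvStep2, if_neg (by simp [ha])]
      rw [hstep0]
      have hfold := pv_foldl_hom
        (fun q : Int × List Char × List Char => (q.1, a :: q.2.1, q.2.2))
        (fun st (k : Nat) => pvStep2 st (((k + 1 : Nat)) : Int))
        (fun st (k : Nat) => pvStep2 st ((k : Nat) : Int))
        (List.range t1.length) (s, t1, t2)
        (fun st k => pv_step2_shift a st k)
      simp only at hfold
      rw [hfold]
      rw [show (List.filter (fun c => decide (c ≠ '_')) (a :: t1))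
            = List.filter (fun c => decide (c ≠ '_')) t1 by simp [ha]]
      exact ih t2 s
    · have hstep0 : pvStep2 (s, a :: t1, t2) ((0 : Nat) : Int)
          = if a ∈ t2 then (s + 1, '_' :: t1, pvMarkFirst a t2) else (s, a :: t1, t2) := by
        rw [pvStep2, if_pos (by simp [ha])]
        have hconv := pv_pyRange_fold_nat (pvInner ((0 : Nat) : Int)) t2.length (s, a :: t1, t2)
        simp only [Nat.cast_zero] at hconv ⊢
        rw [hconv]
        exact pv_inner0 t2 s a t1 ha
      rw [hstep0]
      have hfilter : List.filter (fun c => decide (c ≠ '_')) (a :: t1)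
          = a :: List.filter (fun c => decide (c ≠ '_')) t1 := by simp [ha]
      by_cases hm : a ∈ t2
      · rw [if_pos hm]
        have hfold := pv_foldl_hom
          (fun q : Int × List Char × List Char => (q.1, '_' :: q.2.1, q.2.2))
          (fun st (k : Nat) => pvStep2 st (((k + 1 : Nat)) : Int))
          (fun st (k : Nat) => pvStep2 st ((k : Nat) : Int))
          (List.range t1.length) (s + 1, t1, pvMarkFirst a t2)
          (fun st k => pv_step2_shift '_' st k)
        simp only at hfold
        rw [hfold]
        rw [show (((List.range t1.length).foldl (fun st (k : Nat) => pvStep2 st ((k : Nat) : Int))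
              (s + 1, t1, pvMarkFirst a t2)).1,
            '_' :: ((List.range t1.length).foldl (fun st (k : Nat) => pvStep2 st ((k : Nat) : Int))
              (s + 1, t1, pvMarkFirst a t2)).2.1,
            ((List.range t1.length).foldl (fun st (k : Nat) => pvStep2 st ((k : Nat) : Int))
              (s + 1, t1, pvMarkFirst a t2)).2.2).1
          = ((List.range t1.length).foldl (fun st (k : Nat) => pvStep2 st ((k : Nat) : Int))
              (s + 1, t1, pvMarkFirst a t2)).1 from rfl]
        rw [ih (pvMarkFirst a t2) (s + 1), pv_markFirst_filter a t2 ha, hfilter, pvG]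
        rw [if_pos (List.mem_filter.mpr ⟨hm, by simp [ha]⟩)]
        push_cast
        ring
      · rw [if_neg hm]
        have hfold := pv_foldl_hom
          (fun q : Int × List Char × List Char => (q.1, a :: q.2.1, q.2.2))
          (fun st (k : Nat) => pvStep2 st (((k + 1 : Nat)) : Int))
          (fun st (k : Nat) => pvStep2 st ((k : Nat) : Int))
          (List.range t1.length) (s, t1, t2)
          (fun st k => pv_step2_shift a st k)
        simp only at hfold
        rw [hfold]
        rw [hfilter, pvG, if_neg (fun hc => hm (List.mem_of_mem_filter hc))]
        exact ih t2 s

-- pvMark's count is the zip count of positional matches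
theorem pv_mark_fst : ∀ (t1 t2 : List Char),
    (pvMark t1 t2).1 = (t1.zip t2).countP (fun p => p.1 == p.2) := by
  intro t1
  induction t1 with
  | nil => intro t2; simp [pvMark]
  | cons a as ih =>
    intro t2
    cases t2 with
    | nil => simp [pvMark]
    | cons b bs =>
      rw [pvMark]
      by_cases h : a = b <;> simp [h, ih]

theorem pv_mark_filter1 : ∀ (t1 t2 : List Char),
    (pvMark t1 t2).2.1.filter (fun c => c ≠ '_')
      = ((t1.zip t2).filter (fun p => p.1 ≠ p.2 ∧ p.1 ≠ '_')).map (fun p => p.1)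
        ++ (t1.drop (min t1.length t2.length)).filter (fun c => c ≠ '_') := by
  intro t1
  induction t1 with
  | nil => intro t2; simp [pvMark]
  | cons a as ih =>
    intro t2
    cases t2 with
    | nil => simp [pvMark]
    | cons b bs =>
      rw [pvMark]
      simp only [List.zip_cons_cons]
      by_cases hab : a = b
      · rw [if_pos hab]
        simpa [List.filter_cons, hab] using ih bs
      · rw [if_neg hab]
        by_cases ha : a = '_'
        · simpa [List.filter_cons, ha, hab] using ih bs
        · simpa [List.filter_cons, ha, hab] using ih bs

theorem pv_mark_filter2 : ∀ (t1 t2 : List Char),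
    (pvMark t1 t2).2.2.filter (fun c => c ≠ '_')
      = ((t1.zip t2).filter (fun p => p.1 ≠ p.2 ∧ p.2 ≠ '_')).map (fun p => p.2)
        ++ (t2.drop (min t1.length t2.length)).filter (fun c => c ≠ '_') := by
  intro t1
  induction t1 with
  | nil => intro t2; simp [pvMark]
  | cons a as ih =>
    intro t2
    cases t2 with
    | nil => simp [pvMark]
    | cons b bs =>
      rw [pvMark]
      simp only [List.zip_cons_cons]
      by_cases hab : a = b
      · rw [if_pos hab]
        simpa [List.filter_cons, hab] using ih bs
      · rw [if_neg hab]
        by_cases hb : b = '_'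
        · simpa [List.filter_cons, hb, hab] using ih bs
        · simpa [List.filter_cons, hb, hab] using ih bs

-- the greedy count is the multiset intersection cardinality
theorem pv_G_eq_inter : ∀ (l1 l2 : List Char),
    pvG l1 l2 = Multiset.card ((l1 : Multiset Char) ∩ (l2 : Multiset Char)) := by
  intro l1
  induction l1 with
  | nil => intro l2; simp [pvG]
  | cons c cs ih =>
    intro l2
    rw [pvG]
    by_cases h : c ∈ l2
    · rw [if_pos h]
      rw [show ((c :: cs : List Char) : Multiset Char) = c ::ₘ (cs : Multiset Char) from rfl]
      rw [Multiset.cons_inter_of_pos _ (by simpa using h)]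
      simp [ih, ← Multiset.coe_erase]
    · rw [if_neg h]
      rw [show ((c :: cs : List Char) : Multiset Char) = c ::ₘ (cs : Multiset Char) from rfl]
      rw [Multiset.cons_inter_of_neg _ (by simpa using h)]
      exact ih l2

-- a 0/1 indicator sum over the zip is the positional-match count
theorem pv_sum_ite : ∀ (l : List (Char × Char)),
    (l.map (fun p => if p.1 = p.2 then (1 : Int) else 0)).sum
      = (l.countP (fun p => p.1 == p.2) : Int) := by
  intro l
  induction l with
  | nil => simp
  | cons p ps ih =>
    by_cases h : p.1 = p.2 <;> simp [h, ih] <;> ring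

-- B's sum of min-counts over the distinct elements is the same cardinality
theorem pv_summin_eq_inter (r1 r2 : List Char) :
    ((PySem.Set.ofList r1).map
        (fun c => min ((r1.count c : Int)) ((r2.count c : Int)))).sum
      = (Multiset.card ((r1 : Multiset Char) ∩ (r2 : Multiset Char)) : Int) := by
  have h1 : ((PySem.Set.ofList r1).map
        (fun c => min ((r1.count c : Int)) ((r2.count c : Int)))).sum
      = ∑ c ∈ r1.toFinset, min ((r1.count c : Int)) ((r2.count c : Int)) := by
    rw [← List.sum_toFinset _ (PySem.Set.nodup_ofList r1)]
    apply Finset.sum_congr _ (fun _ _ => rfl)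
    ext c
    simp [PySem.Set.mem_ofList]
  rw [h1]
  have hsub : ((r1 : Multiset Char) ∩ (r2 : Multiset Char)).toFinset ⊆ r1.toFinset := by
    intro c hc
    simp only [Multiset.mem_toFinset, Multiset.mem_inter, Multiset.mem_coe] at hc
    simpa using hc.1
  have h2 : ∑ c ∈ r1.toFinset, min (r1.count c) (r2.count c)
      = Multiset.card ((r1 : Multiset Char) ∩ (r2 : Multiset Char)) := by
    rw [← Multiset.toFinset_sum_count_eq]
    rw [Finset.sum_subset hsub]
    · apply Finset.sum_congr rfl
      intro c _
      rw [Multiset.count_inter]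
      simp
    · intro c hcf hc
      simp only [Multiset.mem_toFinset, Multiset.mem_inter, Multiset.mem_coe] at hc
      have h0 : r2.count c = 0 :=
        List.count_eq_zero.mpr (fun h => hc ⟨by simpa using hcf, h⟩)
      simp [h0]
  rw [← h2, Nat.cast_sum]
  apply Finset.sum_congr rfl
  intro c _
  rw [Nat.cast_min]

-- zip-with-fst plus the unpaired tail reassembles the first list
theorem pv_zip_fst_drop : ∀ (l1 l2 : List Char),
    (l1.zip l2).map Prod.fst ++ l1.drop (min l1.length l2.length) = l1 := by
  intro l1
  induction l1 with
  | nil => intro l2; simp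
  | cons a as ih =>
    intro l2
    cases l2 with
    | nil => simp
    | cons b bs => simp [Nat.succ_min_succ, ih]

theorem pv_zip_snd_drop : ∀ (l1 l2 : List Char),
    (l1.zip l2).map Prod.snd ++ l2.drop (min l1.length l2.length) = l2 := by
  intro l1
  induction l1 with
  | nil => intro l2; simp
  | cons a as ih =>
    intro l2
    cases l2 with
    | nil => simp
    | cons b bs => simp [Nat.succ_min_succ, ih]

-- decomposition of a list as exact-matched part + leftover part (as multisets)
theorem pv_split1 (l1 l2 : List Char) :
    (l1 : Multiset Char)
      = (((l1.zip l2).filter (fun p => p.1 == p.2)).map Prod.fst : Multiset Char)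
        + (pvLeft1 l1 l2 : Multiset Char) := by
  rw [pvLeft1, Multiset.coe_add, Multiset.coe_eq_coe]
  have h2 := (List.filter_append_perm (fun p : Char × Char => p.1 == p.2) (l1.zip l2)).map Prod.fst
  rw [List.map_append] at h2
  have h3 := h2.append_right (l1.drop (min l1.length l2.length))
  rw [List.append_assoc, pv_zip_fst_drop l1 l2] at h3
  exact h3.symm

theorem pv_split2 (l1 l2 : List Char) :
    (l2 : Multiset Char)
      = (((l1.zip l2).filter (fun p => p.1 == p.2)).map Prod.snd : Multiset Char)
        + (pvLeft2 l1 l2 : Multiset Char) := by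
  rw [pvLeft2, Multiset.coe_add, Multiset.coe_eq_coe]
  have h2 := (List.filter_append_perm (fun p : Char × Char => p.1 == p.2) (l1.zip l2)).map Prod.snd
  rw [List.map_append] at h2
  have h3 := h2.append_right (l2.drop (min l1.length l2.length))
  rw [List.append_assoc, pv_zip_snd_drop l1 l2] at h3
  exact h3.symm

-- the two exact-matched parts are the same list
theorem pv_eq_parts (l1 l2 : List Char) :
    ((l1.zip l2).filter (fun p => p.1 == p.2)).map Prod.fst
      = ((l1.zip l2).filter (fun p => p.1 == p.2)).map Prod.snd := by
  apply List.map_congr_left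
  intro p hp
  have := List.of_mem_filter hp
  simpa using this

-- intersection cancels a common summand
theorem pv_add_inter (E s t : Multiset Char) : (E + s) ∩ (E + t) = E + s ∩ t := by
  apply Multiset.ext.mpr
  intro a
  simp only [Multiset.count_inter, Multiset.count_add]
  omega

-- splitting an intersection cardinality at the character '_'
theorem pv_inter_card_split (L1 L2 : List Char) :
    Multiset.card ((L1 : Multiset Char) ∩ (L2 : Multiset Char))
      = min (L1.count '_') (L2.count '_')
        + Multiset.card ((L1.filter (fun c => c ≠ '_') : Multiset Char)
            ∩ (L2.filter (fun c => c ≠ '_') : Multiset Char)) := by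
  have key : ∀ L : List Char,
      (L : Multiset Char)
        = Multiset.replicate (L.count '_') '_' + (L.filter (fun c => c ≠ '_') : Multiset Char) := by
    intro L
    rw [← Multiset.coe_replicate, Multiset.coe_add, Multiset.coe_eq_coe]
    have h := (List.filter_append_perm (fun c => c == '_') L).symm
    rw [List.filter_beq (a := '_') (l := L)] at h
    refine h.trans (List.Perm.append_left _ (List.Perm.of_eq ?_))
    apply List.filter_congr
    intro a _
    by_cases hc : a = '_' <;> simp [hc]
  have hz1 : ((L1.filter (fun c => c ≠ '_') : List Char) : Multiset Char).count '_' = 0 := by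
    rw [Multiset.coe_count]
    exact List.count_eq_zero.mpr (fun h => by simpa using (List.mem_filter.mp h).2)
  have hz2 : ((L2.filter (fun c => c ≠ '_') : List Char) : Multiset Char).count '_' = 0 := by
    rw [Multiset.coe_count]
    exact List.count_eq_zero.mpr (fun h => by simpa using (List.mem_filter.mp h).2)
  have hsplit : ((L1 : Multiset Char) ∩ (L2 : Multiset Char))
      = Multiset.replicate (min (L1.count '_') (L2.count '_')) '_'
        + ((L1.filter (fun c => c ≠ '_') : Multiset Char)
            ∩ (L2.filter (fun c => c ≠ '_') : Multiset Char)) := by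
    rw [key L1, key L2]
    apply Multiset.ext.mpr
    intro a
    by_cases ha : a = '_'
    · subst ha
      simp [Multiset.count_inter, Multiset.count_add, Multiset.count_replicate, hz1, hz2]
    · have ha' : ¬ ('_' = a) := fun h => ha h.symm
      simp [Multiset.count_inter, Multiset.count_add, Multiset.count_replicate, ha, ha']
  rw [hsplit, Multiset.card_add, Multiset.card_replicate]

-- the leftover-filter bridge: A's masked-and-filtered lists are B's leftovers filtered
theorem pv_left_filter1 (l1 l2 : List Char) :
    (pvLeft1 l1 l2).filter (fun c => c ≠ '_')
      = ((l1.zip l2).filter (fun p => p.1 ≠ p.2 ∧ p.1 ≠ '_')).map (fun p => p.1)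
        ++ (l1.drop (min l1.length l2.length)).filter (fun c => c ≠ '_') := by
  rw [pvLeft1, List.filter_append]
  congr 1
  rw [List.filter_map, List.filter_filter]
  congr 1
  apply List.filter_congr
  intro a _
  by_cases h1 : a.1 = a.2 <;> by_cases h2 : a.1 = '_' <;> simp [Function.comp, h1, h2]

theorem pv_left_filter2 (l1 l2 : List Char) :
    (pvLeft2 l1 l2).filter (fun c => c ≠ '_')
      = ((l1.zip l2).filter (fun p => p.1 ≠ p.2 ∧ p.2 ≠ '_')).map (fun p => p.2)
        ++ (l2.drop (min l1.length l2.length)).filter (fun c => c ≠ '_') := by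
  rw [pvLeft2, List.filter_append]
  congr 1
  rw [List.filter_map, List.filter_filter]
  congr 1
  apply List.filter_congr
  intro a _
  by_cases h1 : a.1 = a.2 <;> by_cases h2 : a.2 = '_' <;> simp [Function.comp, h1, h2]

-- master identity: B = A + min(leftover '_' counts)
theorem pv_master (napis1 napis2 : String) :
    nasluch2_alt napis1 napis2
      = nasluch2 napis1 napis2
        + min (((pvLeft1 napis1.toList napis2.toList).count '_' : Int))
              (((pvLeft2 napis1.toList napis2.toList).count '_' : Int)) := by
  unfold nasluch2 nasluch2_alt
  simp only []
  have hmin : (min (napis1.toList.length : Int) (napis2.toList.length : Int))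
      = ((min napis1.toList.length napis2.toList.length : Nat) : Int) := by
    simp [Nat.cast_min]
  rw [hmin, pv_pyRange_fold_nat pvStep1, pv_loop1_eq,
    pv_pyRange_fold_nat pvStep2, pv_loop2_eq,
    pv_mark_filter1, pv_mark_filter2, ← pv_left_filter1, ← pv_left_filter2,
    pv_sum_ite, pv_summin_eq_inter, pv_G_eq_inter, pv_mark_fst]
  rw [pv_split1 napis1.toList napis2.toList, pv_split2 napis1.toList napis2.toList,
    ← pv_eq_parts, pv_add_inter, Multiset.card_add,
    pv_inter_card_split (pvLeft1 napis1.toList napis2.toList) (pvLeft2 napis1.toList napis2.toList)]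
  rw [Multiset.coe_card, List.length_map, ← List.countP_eq_length_filter]
  push_cast
  ring

-- ===== VERDICT (by name: the statements are the Claim_ definitions above) =====
theorem nasluch2_spec : Claim_unchanged_nasluch2 := by
  intro napis1 napis2 _ hD
  rw [pv_master]
  unfold D_nasluch2 at hD
  have h1 := pv_cnt1 napis1.toList napis2.toList
  have h2 := pv_cnt2 napis1.toList napis2.toList
  have hu : (pvLeft1 napis1.toList napis2.toList).count '_' = 0
      ∨ (pvLeft2 napis1.toList napis2.toList).count '_' = 0 := by omega
  rcases hu with h | h <;> rw [h] <;> simp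

theorem nasluch2_changed : Claim_changed_nasluch2 := by
  unfold Claim_changed_nasluch2; decide

theorem nasluch2_tight : Claim_exact_nasluch2 := by
  intro napis1 napis2 _ hD
  unfold D_nasluch2 at hD
  rw [pv_master]
  have hc1 := pv_cnt1 napis1.toList napis2.toList
  have hc2 := pv_cnt2 napis1.toList napis2.toList
  have h1 : 0 < ((pvLeft1 napis1.toList napis2.toList).count '_' : Int) := by
    have : 0 < (pvLeft1 napis1.toList napis2.toList).count '_' := by omega
    exact_mod_cast this
  have h2 : 0 < ((pvLeft2 napis1.toList napis2.toList).count '_' : Int) := by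
    have : 0 < (pvLeft2 napis1.toList napis2.toList).count '_' := by omega
    exact_mod_cast this
  intro hEq
  omega
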